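-- pv_equiv track=rewrite | github.com/carlosan2025/juris-agi-monorepo | apps/evidence-api/src/evidence_repository/services/search_service.py | _calculate_highlights
-- ===== SOURCE A (Python) =====
-- def _calculate_highlights(
--     text: str, keywords: list[str] | None
-- ) -> list[dict[str, int]] | None:
--     """Calculate character ranges for keyword highlights."""
--     if not keywords:
--         return None
--
--     highlights = []
--     text_lower = text.lower()
--
--     for keyword in keywords:
--         keyword_lower = keyword.lower()
--         start = 0
--         while True:
--             pos = text_lower.find(keyword_lower, start)
--             if pos == -1:
--                 break
--             highlights.append({"start": pos, "end": pos + len(keyword)})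
--             start = pos + 1
--
--     # Sort by position and merge overlapping ranges
--     if not highlights:
--         return None
--
--     highlights.sort(key=lambda x: x["start"])
--     merged = [highlights[0]]
--     for h in highlights[1:]:
--         if h["start"] <= merged[-1]["end"]:
--             merged[-1]["end"] = max(merged[-1]["end"], h["end"])
--         else:
--             merged.append(h)
--
--     return merged
-- ===== SOURCE B (Python) =====
-- def _calculate_highlights(text, keywords):
--     """Single left-to-right scan over the text: at each position try every
--     keyword (position-major order), so matches come out already sorted by
--     start and can be merged on the fly - no sort pass needed."""
--     if not keywords:
--         return None
--     text_lower = text.lower()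
--     kws = [(k.lower(), len(k)) for k in keywords]
--     merged = []
--     for i in range(len(text_lower) + 1):
--         for kl, L in kws:
--             if text_lower.startswith(kl, i):
--                 if merged and i <= merged[-1]["end"]:
--                     merged[-1]["end"] = max(merged[-1]["end"], i + L)
--                 else:
--                     merged.append({"start": i, "end": i + L})
--     return merged or None
-- ===== Notes on version B (the rewrite author's own statement) =====
-- stated objective: alternative
-- what changed: Replaced A's keyword-major repeated str.find scan followed by a sort and a separate merge pass with a single position-major left-to-right scan of the text (startswith at each position) that emits matches already ordered by start and merges overlapping ranges on the fly, eliminating the sort entirely.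
import Mathlib
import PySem

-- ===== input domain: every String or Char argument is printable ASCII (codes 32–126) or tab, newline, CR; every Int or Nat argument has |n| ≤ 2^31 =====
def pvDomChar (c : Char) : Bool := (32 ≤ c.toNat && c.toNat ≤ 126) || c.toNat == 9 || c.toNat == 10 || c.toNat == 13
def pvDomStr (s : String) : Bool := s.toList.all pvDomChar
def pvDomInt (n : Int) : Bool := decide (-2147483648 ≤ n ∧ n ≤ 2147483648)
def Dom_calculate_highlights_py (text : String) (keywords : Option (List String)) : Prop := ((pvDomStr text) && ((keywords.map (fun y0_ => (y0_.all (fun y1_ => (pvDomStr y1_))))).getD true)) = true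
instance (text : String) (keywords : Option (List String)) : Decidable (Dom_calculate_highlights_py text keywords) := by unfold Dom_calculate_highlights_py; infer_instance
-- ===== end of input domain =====

-- B replaces A's keyword-major repeated find + sort + merge pass by one position-major scan
-- of the text that emits matches already ordered by start and merges them on the fly
-- (objective: alternative; same return value).

-- Python-dict primitives shared by both ports ({"start": _, "end": _} is a 2-entry assoc list):
-- h[k]; every dict either program builds carries the key k, so the default is never taken — exact
def pvGetKey (h : List (String × Int)) (k : String) : Int := (h.lookup k).getD 0
-- d[k] = v where k is already a key of d (Python overwrites in place, order kept — exact here)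
def pvSetKey (h : List (String × Int)) (k : String) (v : Int) : List (String × Int) :=
  h.map (fun p => if p.1 == k then (k, v) else p)

-- ===== PORT A =====
-- bounds of text_lower.find(keyword_lower, start), needed for termination of the while loop
theorem pvFindFrom_bounds (tl kl : List Char) (s : Nat)
    (h : PySem.Chars.findFrom tl kl (s : Int) none ≠ -1) :
    s ≤ tl.length ∧ (s : Int) ≤ PySem.Chars.findFrom tl kl (s : Int) none ∧
      PySem.Chars.findFrom tl kl (s : Int) none ≤ (tl.length : Int) := by
  by_cases hs : s ≤ tl.length
  · rw [PySem.Chars.findFrom_natCast tl kl s hs] at h ⊢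
    by_cases hf : PySem.Chars.find (tl.drop s) kl = -1
    · simp [hf] at h
    · have h0 := PySem.Chars.neg_one_le_find (tl.drop s) kl
      have h1 := PySem.Chars.find_le_length (tl.drop s) kl
      simp [hf] at h1 ⊢
      omega
  · exfalso; apply h
    have : (tl.length : Int) < (s : Int) := by exact_mod_cast Nat.lt_of_not_le (by omega)
    simp [PySem.Chars.findFrom]
    omega

-- A's 'while True' find loop, appending {"start": pos, "end": pos + len(keyword)}
def pvFindAll (tl kl : List Char) (kwlen : Int) (start : Nat)
    (acc : List (List (String × Int))) : List (List (String × Int)) :=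
  let pos := PySem.Chars.findFrom tl kl (start : Int) none
  if h : pos = -1 then acc
  else pvFindAll tl kl kwlen (pos.toNat + 1) (acc ++ [[("start", pos), ("end", pos + kwlen)]])
termination_by tl.length + 1 - start
decreasing_by
  have hb := pvFindFrom_bounds tl kl start h
  omega

-- merged[-1]["end"] = max(...) / merged.append(h); the 'none' branch is unreachable (merged starts nonempty)
def pvMergeStep (merged : List (List (String × Int))) (h : List (String × Int)) :
    List (List (String × Int)) :=
  match merged.getLast? with
  | none => merged ++ [h]
  | some last =>
    if pvGetKey h "start" ≤ pvGetKey last "end" then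
      merged.dropLast ++ [pvSetKey last "end" (max (pvGetKey last "end") (pvGetKey h "end"))]
    else merged ++ [h]

def calculate_highlights_py (text : String) (keywords : Option (List String)) :
    Option (List (List (String × Int))) :=
  match keywords with
  | none => none
  | some ks =>
    if ks = [] then none
    else
      let highlights := ks.foldl
        (fun acc kw => pvFindAll (PySem.Chars.lower text.toList)
          (PySem.Chars.lower kw.toList) (PySem.Str.len kw) 0 acc) []
      if highlights = [] then none
      else
        match PySem.List.sorted highlights (fun x => pvGetKey x "start") false with
        | [] => none  -- unreachable: sorted of a nonempty list is nonempty
        | h0 :: rest => some (rest.foldl pvMergeStep [h0])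

-- ===== PORT B =====
-- merge-or-append of the freshly found match [i, i+L) into the running merged list
def pvBStep (merged : List (List (String × Int))) (i L : Int) : List (List (String × Int)) :=
  match merged.getLast? with
  | none => merged ++ [[("start", i), ("end", i + L)]]
  | some last =>
    if i ≤ pvGetKey last "end" then
      merged.dropLast ++ [pvSetKey last "end" (max (pvGetKey last "end") (i + L))]
    else merged ++ [[("start", i), ("end", i + L)]]

def calculate_highlights_py_alt (text : String) (keywords : Option (List String)) :
    Option (List (List (String × Int))) :=
  match keywords with
  | none => none
  | some ks =>
    if ks = [] then none
    else
      let merged := (List.range ((PySem.Chars.lower text.toList).length + 1)).foldl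
        (fun (acc : List (List (String × Int))) (i : Nat) =>
          (ks.map (fun k => (PySem.Chars.lower k.toList, PySem.Str.len k))).foldl
          (fun acc p =>
            -- text_lower.startswith(kl, i) with 0 ≤ i ≤ len: exactly startswith on drop i
            if PySem.Chars.startswith ((PySem.Chars.lower text.toList).drop i) p.1 then
              pvBStep acc (i : Int) p.2
            else acc) acc) []
      if merged = [] then none else some merged

-- ===== PRECONDITION & SPEC =====
def Spec_calculate_highlights_py (text : String) (keywords : Option (List String)) (out : Option (List (List (String × Int)))) : Prop := out = calculate_highlights_py_alt text keywords
instance (text : String) (keywords : Option (List String)) (out : Option (List (List (String × Int)))) : Decidable (Spec_calculate_highlights_py text keywords out) := by unfold Spec_calculate_highlights_py; infer_instance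

-- ===== CLAIM (what is proved, stated in full; the proofs are below) =====
def Claim_equal_calculate_highlights_py : Prop := ∀ (text : String) (keywords : Option (List String)), Dom_calculate_highlights_py text keywords → Spec_calculate_highlights_py text keywords (calculate_highlights_py text keywords)

-- ===== LEMMAS AND PROOFS =====

-- canonical description of the matches: position i matches keyword kl iff kl <+: tl.drop i
def pvPred (tl kl : List Char) (i : Nat) : Bool := decide (kl <+: tl.drop i)
def pvHL (i m : Nat) : List (String × Int) := [("start", (i : Int)), ("end", (i : Int) + (m : Int))]
def pvOcc (tl kl : List Char) : List Nat := (List.range (tl.length + 1)).filter (pvPred tl kl)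
def pvKey (h : List (String × Int)) : Int := pvGetKey h "start"
def pvRow (tl : List Char) (kws : List (List Char × Nat)) (i : Nat) : List (List (String × Int)) :=
  (kws.filter (fun p => pvPred tl p.1 i)).map (fun p => pvHL i p.2)
def pvMatchB (tl : List Char) (kws : List (List Char × Nat)) : List (List (String × Int)) :=
  (List.range (tl.length + 1)).flatMap (pvRow tl kws)

theorem pvKey_pvHL (i m : Nat) : pvKey (pvHL i m) = (i : Int) := by
  simp [pvKey, pvGetKey, pvHL]

theorem pvGetKey_end_pvHL (i m : Nat) : pvGetKey (pvHL i m) "end" = (i : Int) + (m : Int) := by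
  simp [pvGetKey, pvHL, List.lookup]

theorem pvNoMatch (tl kl : List Char) (s i : Nat) (hs : s ≤ i)
    (hno : ¬ kl <:+: tl.drop s) : pvPred tl kl i = false := by
  simp only [pvPred, decide_eq_false_iff_not]
  intro hp
  exact hno (by
    have : tl.drop i = (tl.drop s).drop (i - s) := by rw [List.drop_drop]; congr 1; omega
    rw [this] at hp
    exact hp.isInfix.trans (List.drop_suffix _ _).isInfix)

theorem pvFindAll_eq (tl kl : List Char) (kwlen : Int) (s : Nat)
    (acc : List (List (String × Int))) :
    pvFindAll tl kl kwlen s acc =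
      acc ++ ((List.range' s (tl.length + 1 - s)).filter (pvPred tl kl)).map
        (fun (i : Nat) => [("start", (i : Int)), ("end", (i : Int) + kwlen)]) := by
  induction s, acc using pvFindAll.induct tl kl kwlen with
  | case1 s acc pos hpos =>
    rw [pvFindAll]
    rw [dif_pos hpos]
    by_cases hs : s ≤ tl.length
    · have hni : ¬ kl <:+: tl.drop s := by
        rw [← PySem.Chars.findFrom_natCast_eq_neg_one_iff tl kl s hs]
        exact hpos
      have : (List.range' s (tl.length + 1 - s)).filter (pvPred tl kl) = [] := by
        rw [List.filter_eq_nil_iff]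
        intro i hi
        rw [List.mem_range'] at hi
        obtain ⟨j, hj, rfl⟩ := hi
        simpa using pvNoMatch tl kl s (s + j) (by omega) hni
      simp [this]
    · have : tl.length + 1 - s = 0 := by omega
      simp [this]
  | case2 s acc pos hpos ih =>
    rw [pvFindAll]
    rw [dif_neg hpos]
    rw [ih]
    have hb := pvFindFrom_bounds tl kl s hpos
    have hs : s ≤ tl.length := hb.1
    have hspec := PySem.Chars.findFrom_natCast_spec tl kl s hs hpos
    set p := (PySem.Chars.findFrom tl kl (s : Int) none).toNat with hp
    have hposp : PySem.Chars.findFrom tl kl (s : Int) none = (p : Int) := by omega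
    have hsp : s ≤ p := by omega
    have hpn : p ≤ tl.length := by omega
    have hdecomp : List.range' s (tl.length + 1 - s) =
        List.range' s (p - s) ++ p :: List.range' (p + 1) (tl.length - p) := by
      have hsum : tl.length + 1 - s = (p - s) + ((tl.length - p) + 1) := by omega
      have hsp' : s + (p - s) = p := by omega
      rw [hsum, ← List.range'_append]
      simp only [Nat.one_mul]
      rw [hsp', List.range'_succ]
    have hfilter1 : (List.range' s (p - s)).filter (pvPred tl kl) = [] := by
      rw [List.filter_eq_nil_iff]
      intro i hi
      rw [List.mem_range'] at hi
      obtain ⟨j, hj, rfl⟩ := hi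
      simp only [pvPred, decide_eq_true_eq]
      exact hspec.2.2 (s + 1 * j) (by omega) (by omega)
    have hpredp : pvPred tl kl p = true := by
      simp only [pvPred, decide_eq_true_eq]
      exact hspec.2.1
    have hposp2 : pos = (p : Int) := hposp
    rw [hdecomp]
    simp [List.filter_append, hfilter1, hpredp, hposp2]

theorem pvInsertBy_filter {α : Type} (key : α → Int) (x : α) (ys : List α)
    (hys : ys.Pairwise (fun a b => key a ≤ key b)) (v : Int) :
    (PySem.List.insertBy (fun a b => decide (key a < key b)) x ys).filter (fun a => key a == v) =
      ys.filter (fun a => key a == v) ++ (if key x == v then [x] else []) := by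
  induction ys with
  | nil => by_cases hv : key x == v <;> simp [PySem.List.insertBy, List.filter, hv]
  | cons y ys ih =>
    rw [List.pairwise_cons] at hys
    by_cases hb : key x < key y
    · simp only [PySem.List.insertBy, hb, decide_true, if_true]
      by_cases hv : key x == v
      · have hvx : key x = v := by simpa using hv
        have hnil : (y :: ys).filter (fun a => key a == v) = [] := by
          rw [List.filter_eq_nil_iff]
          intro c hc
          have hyc : key y ≤ key c := by
            rcases List.mem_cons.mp hc with h | h
            · subst h; exact le_refl _
            · exact hys.1 c h
          simp only [beq_iff_eq]
          omega
        rw [List.filter_cons_of_pos (by simpa using hv), hnil, if_pos hv]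
        simp
      · rw [List.filter_cons_of_neg (by simpa using hv), if_neg hv]
        simp
    · simp only [PySem.List.insertBy, hb, decide_false]
      by_cases hy : key y == v <;>
        simp [hy, ih hys.2]

theorem pvSorted_filter {α : Type} (xs : List α) (key : α → Int) (v : Int) :
    (PySem.List.sorted xs key false).filter (fun a => key a == v) =
      xs.filter (fun a => key a == v) := by
  induction xs using List.reverseRecOn with
  | nil => simp [PySem.List.sorted]
  | append_singleton xs x ih =>
    have hs : PySem.List.sorted (xs ++ [x]) key false =
        PySem.List.insertBy (fun a b => decide (key a < key b)) x
          (PySem.List.sorted xs key false) := by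
      rw [PySem.List.sorted_eq_foldl_insertBy, PySem.List.sorted_eq_foldl_insertBy,
        List.foldl_append]
      rfl
    rw [hs, pvInsertBy_filter key x _ (PySem.List.sorted_pairwise xs key) v, ih,
      List.filter_append]
    congr 1
    by_cases hv : key x == v <;> simp [List.filter, hv]

theorem pvEq_of_filters {α : Type} (key : α → Int) (l1 l2 : List α)
    (h1 : l1.Pairwise (fun a b => key a ≤ key b)) (h2 : l2.Pairwise (fun a b => key a ≤ key b))
    (hf : ∀ v : Int, l1.filter (fun a => key a == v) = l2.filter (fun a => key a == v)) :
    l1 = l2 := by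
  induction l1 generalizing l2 with
  | nil =>
    cases l2 with
    | nil => rfl
    | cons b t2 =>
      have hfb := hf (key b)
      rw [List.filter_cons_of_pos (by simp)] at hfb
      simp at hfb
  | cons a t1 ih =>
    cases l2 with
    | nil =>
      have hfa := hf (key a)
      rw [List.filter_cons_of_pos (by simp)] at hfa
      simp at hfa
    | cons b t2 =>
      rw [List.pairwise_cons] at h1 h2
      have hab : key a = key b := by
        rcases lt_trichotomy (key a) (key b) with h | h | h
        · exfalso
          have hfa := hf (key a)
          rw [List.filter_cons_of_pos (by simp),
            List.filter_cons_of_neg (by simp; omega)] at hfa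
          have hnil : t2.filter (fun x => key x == key a) = [] := by
            rw [List.filter_eq_nil_iff]
            intro c hc
            have := h2.1 c hc
            simp only [beq_iff_eq]
            omega
          rw [hnil] at hfa
          simp at hfa
        · exact h
        · exfalso
          have hfb := hf (key b)
          rw [List.filter_cons_of_neg (by simp; omega),
            List.filter_cons_of_pos (by simp)] at hfb
          have hnil : t1.filter (fun x => key x == key b) = [] := by
            rw [List.filter_eq_nil_iff]
            intro c hc
            have := h1.1 c hc
            simp only [beq_iff_eq]
            omega
          rw [hnil] at hfb
          simp at hfb
      have hab2 : a = b := by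
        have hfa := hf (key a)
        rw [List.filter_cons_of_pos (by simp),
          List.filter_cons_of_pos (by simp [hab])] at hfa
        exact (List.cons_eq_cons.mp hfa).1
      subst hab2
      congr 1
      apply ih t2 h1.2 h2.2
      intro v
      have hfv := hf v
      by_cases hv : key a == v
      · simp only [List.filter_cons, hv, if_true] at hfv
        exact (List.cons_eq_cons.mp hfv).2
      · simp only [List.filter_cons, hv, Bool.false_eq_true, if_false] at hfv
        exact hfv

theorem pvMatchA_eq (tl : List Char) (ks : List String) (acc : List (List (String × Int))) :
    ks.foldl (fun acc kw => pvFindAll tl (PySem.Chars.lower kw.toList) (PySem.Str.len kw) 0 acc) acc =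
      acc ++ ks.flatMap (fun kw => (pvOcc tl (PySem.Chars.lower kw.toList)).map
        (fun i => pvHL i kw.toList.length)) := by
  induction ks generalizing acc with
  | nil => simp
  | cons k ks ih =>
    simp only [List.foldl_cons, List.flatMap_cons]
    rw [pvFindAll_eq, ih, List.append_assoc]
    congr 2
    have h0 : List.range' 0 (tl.length + 1 - 0) = List.range (tl.length + 1) := by
      rw [Nat.sub_zero, List.range_eq_range']
    rw [h0]
    rfl

theorem pvPairwise_flatMap {α : Type} (l : List Nat) (g : Nat → List α) (key : α → Int)
    (hg : ∀ i, ∀ a ∈ g i, key a = (i : Int)) (hl : l.Pairwise (· ≤ ·)) :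
    (l.flatMap g).Pairwise (fun a b => key a ≤ key b) := by
  induction l with
  | nil => simp
  | cons i l ih =>
    rw [List.pairwise_cons] at hl
    simp only [List.flatMap_cons]
    rw [List.pairwise_append]
    refine ⟨List.pairwise_of_forall_mem_list ?_, ih hl.2, ?_⟩
    · intro a ha b hb
      rw [hg i a ha, hg i b hb]
    · intro a ha b hb
      rw [List.mem_flatMap] at hb
      obtain ⟨j, hj, hbj⟩ := hb
      rw [hg i a ha, hg j b hbj]
      exact_mod_cast hl.1 j hj

theorem pvPairwise_matchB (tl : List Char) (kws : List (List Char × Nat)) :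
    (pvMatchB tl kws).Pairwise (fun a b => pvKey a ≤ pvKey b) := by
  apply pvPairwise_flatMap
  · intro i a ha
    rw [pvRow] at ha
    rw [List.mem_map] at ha
    obtain ⟨p, _, rfl⟩ := ha
    exact pvKey_pvHL i p.2
  · exact List.pairwise_lt_range.imp (fun h => Nat.le_of_lt h)

theorem pvFilter_range_single (mx : Nat) (p : Nat → Bool) (v : Int) :
    (List.range mx).filter (fun i => p i && ((i : Int) == v)) =
      if 0 ≤ v ∧ v < (mx : Int) ∧ p v.toNat then [v.toNat] else [] := by
  induction mx with
  | zero => rw [if_neg (by rintro ⟨h1, h2, _⟩; omega)]; rfl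
  | succ m ihm =>
    rw [List.range_succ, List.filter_append, ihm]
    simp only [List.filter_cons, List.filter_nil]
    by_cases hm : ((m : Nat) : Int) = v
    · subst hm
      rw [if_neg (by rintro ⟨h1, h2, _⟩; omega)]
      by_cases hp : p m
      · have hc : 0 ≤ ((m : Nat) : Int) ∧ ((m : Nat) : Int) < ((m + 1 : Nat) : Int) ∧
            p (((m : Nat) : Int)).toNat = true := ⟨by omega, by push_cast; omega, by simpa using hp⟩
        rw [if_pos hc]
        simp [hp]
      · have hnc : ¬(0 ≤ ((m : Nat) : Int) ∧ ((m : Nat) : Int) < ((m + 1 : Nat) : Int) ∧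
            p (((m : Nat) : Int)).toNat = true) := by
          rintro ⟨-, -, h3⟩; rw [Int.toNat_natCast] at h3; exact hp h3
        rw [if_neg hnc]
        simp [hp]
    · have hmf : (((m : Nat) : Int) == v) = false := by simpa using hm
      simp only [hmf, Bool.and_false, Bool.false_eq_true, if_false, List.append_nil]
      by_cases h0 : 0 ≤ v ∧ v < (m : Int) ∧ p v.toNat
      · have hc : 0 ≤ v ∧ v < ((m + 1 : Nat) : Int) ∧ p v.toNat = true :=
          ⟨h0.1, by push_cast; omega, h0.2.2⟩
        rw [if_pos h0, if_pos hc]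
      · rw [if_neg h0,
          if_neg (by rintro ⟨h1, h2, h3⟩; push_cast at h2; exact h0 ⟨h1, by omega, h3⟩)]

theorem pvFlatMap_range_single {α : Type} (mx : Nat) (g : Nat → List α) (v : Int) :
    (List.range mx).flatMap (fun (i : Nat) => if (i : Int) == v then g i else []) =
      if 0 ≤ v ∧ v < (mx : Int) then g v.toNat else [] := by
  induction mx with
  | zero => rw [if_neg (by rintro ⟨h1, h2⟩; omega)]; rfl
  | succ m ihm =>
    rw [List.range_succ, List.flatMap_append, ihm]
    simp only [List.flatMap_cons, List.flatMap_nil, List.append_nil]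
    by_cases hm : ((m : Nat) : Int) = v
    · subst hm
      rw [if_neg (by rintro ⟨h1, h2⟩; omega)]
      have hc : 0 ≤ ((m : Nat) : Int) ∧ ((m : Nat) : Int) < ((m + 1 : Nat) : Int) :=
        ⟨by omega, by push_cast; omega⟩
      rw [if_pos hc]
      simp
    · have hmf : (((m : Nat) : Int) == v) = false := by simpa using hm
      simp only [hmf, Bool.false_eq_true, if_false, List.append_nil]
      by_cases h0 : 0 ≤ v ∧ v < (m : Int)
      · have hc : 0 ≤ v ∧ v < ((m + 1 : Nat) : Int) := ⟨h0.1, by push_cast; omega⟩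
        rw [if_pos h0, if_pos hc]
      · rw [if_neg h0, if_neg (by rintro ⟨h1, h2⟩; push_cast at h2; exact h0 ⟨h1, by omega⟩)]

-- flatMap of pointwise singletons is map-of-filter
theorem pvFlatMap_ite {a b : Type} (l : List a) (p : a -> Bool) (f : a -> b) :
    l.flatMap (fun x => if p x then [f x] else []) = (l.filter p).map f := by
  induction l with
  | nil => rfl
  | cons x l ih =>
    rw [List.flatMap_cons, List.filter_cons, ih]
    by_cases hx : p x = true
    . simp [hx]
    . simp [hx]

theorem pvSorted_matchA (tl : List Char) (ks : List String) :
    PySem.List.sorted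
        (ks.flatMap (fun kw => (pvOcc tl (PySem.Chars.lower kw.toList)).map
          (fun (i : Nat) => pvHL i kw.toList.length))) pvKey false =
      pvMatchB tl (ks.map (fun k => (PySem.Chars.lower k.toList, k.toList.length))) := by
  apply pvEq_of_filters pvKey
  · exact PySem.List.sorted_pairwise _ pvKey
  · exact pvPairwise_matchB tl _
  · intro v
    rw [pvSorted_filter]
    rw [List.filter_flatMap]
    have hL : ∀ kw : String,
        (((pvOcc tl (PySem.Chars.lower kw.toList)).map
            (fun (i : Nat) => pvHL i kw.toList.length)).filter (fun a => pvKey a == v))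
        = if 0 ≤ v ∧ v < ((tl.length + 1 : Nat) : Int) ∧
              pvPred tl (PySem.Chars.lower kw.toList) v.toNat = true
          then [pvHL v.toNat kw.toList.length] else [] := by
      intro kw
      rw [List.filter_map]
      have hcomp : ((fun a => pvKey a == v) ∘ (fun (i : Nat) => pvHL i kw.toList.length)) =
          fun (i : Nat) => ((i : Int) == v) := by
        funext i; simp [pvKey_pvHL]
      rw [hcomp, pvOcc, List.filter_filter]
      have hcomm : (fun (i : Nat) => (((i : Int) == v)) && pvPred tl (PySem.Chars.lower kw.toList) i) =
          fun (i : Nat) => pvPred tl (PySem.Chars.lower kw.toList) i && (((i : Int) == v)) := by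
        funext i; rw [Bool.and_comm]
      rw [hcomm, pvFilter_range_single]
      split_ifs with hcnd
      · simp
      · simp
    simp only [hL]
    rw [pvMatchB, List.filter_flatMap]
    have hR : ∀ i : Nat,
        ((pvRow tl (ks.map (fun k => (PySem.Chars.lower k.toList, k.toList.length))) i).filter
          (fun a => pvKey a == v))
        = if (i : Int) == v
          then pvRow tl (ks.map (fun k => (PySem.Chars.lower k.toList, k.toList.length))) i
          else [] := by
      intro i
      rw [pvRow, List.filter_map]
      have hcomp : ((fun a => pvKey a == v) ∘
          (fun (p : List Char × Nat) => pvHL i p.2)) = fun (_ : List Char × Nat) => ((i : Int) == v) := by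
        funext p; simp [pvKey_pvHL]
      rw [hcomp]
      by_cases hi : ((i : Int) == v) = true
      · rw [if_pos hi]
        simp [hi]
      · have hif : ((i : Int) == v) = false := by simpa using hi
        rw [if_neg (by simp [hif])]
        simp [hif]
    simp only [hR]
    rw [pvFlatMap_range_single]
    by_cases h0 : 0 ≤ v ∧ v < ((tl.length + 1 : Nat) : Int)
    · rw [if_pos h0]
      simp only [h0.1, h0.2, true_and]
      rw [pvRow, List.filter_map, List.map_map]
      rw [pvFlatMap_ite]
      rfl
    · rw [if_neg h0]
      have hall : ∀ kw : String,
          (if 0 ≤ v ∧ v < ((tl.length + 1 : Nat) : Int) ∧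
              pvPred tl (PySem.Chars.lower kw.toList) v.toNat = true
            then [pvHL v.toNat kw.toList.length] else []) = ([] : List (List (String × Int))) := by
        intro kw
        rw [if_neg (by rintro ⟨a, b, -⟩; exact h0 ⟨a, b⟩)]
      simp only [hall]
      simp

theorem pvBStep_eq (acc : List (List (String × Int))) (i m : Nat) :
    pvBStep acc (i : Int) ((m : Nat) : Int) = pvMergeStep acc (pvHL i m) := by
  rw [pvBStep, pvMergeStep]
  have hs : pvGetKey (pvHL i m) "start" = (i : Int) := pvKey_pvHL i m
  cases acc.getLast? with
  | none => rfl
  | some last =>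
    dsimp only
    rw [hs, pvGetKey_end_pvHL]
    rfl

-- B's inner keyword loop at position i, rephrased with the canonical predicate
theorem pvStep_if (tl : List Char) (i : Nat) (acc : List (List (String × Int))) (k : String) :
    (if PySem.Chars.startswith (tl.drop i) (PySem.Chars.lower k.toList) then
      pvBStep acc (i : Int) (PySem.Str.len k)
    else acc) =
      (if pvPred tl (PySem.Chars.lower k.toList) i then
        pvMergeStep acc (pvHL i k.toList.length) else acc) := by
  have hc := PySem.Chars.startswith_iff (tl.drop i) (PySem.Chars.lower k.toList)
  have hlen2 : PySem.Str.len k = ((k.toList.length : Nat) : Int) := rfl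
  rw [hlen2, pvBStep_eq]
  by_cases h : pvPred tl (PySem.Chars.lower k.toList) i = true
  · rw [if_pos (hc.mpr (by simpa [pvPred] using h)), if_pos h]
  · rw [if_neg (fun hcc => h (by simpa [pvPred] using hc.mp hcc)), if_neg h]

-- B's double loop is the merge fold over the position-major match list
theorem pvB_loop_eq (tl : List Char) (ks : List String) :
    (List.range (tl.length + 1)).foldl
        (fun (acc : List (List (String × Int))) (i : Nat) =>
          (ks.map (fun k => (PySem.Chars.lower k.toList, PySem.Str.len k))).foldl
          (fun acc p =>
            if PySem.Chars.startswith (tl.drop i) p.1 then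
              pvBStep acc (i : Int) p.2
            else acc) acc) [] =
      (pvMatchB tl (ks.map (fun k => (PySem.Chars.lower k.toList, k.toList.length)))).foldl
        pvMergeStep [] := by
  rw [pvMatchB, List.foldl_flatMap]
  have hfun : (fun (acc : List (List (String × Int))) (i : Nat) =>
      (ks.map (fun k => (PySem.Chars.lower k.toList, PySem.Str.len k))).foldl
        (fun acc p =>
          if PySem.Chars.startswith (tl.drop i) p.1 then
            pvBStep acc (i : Int) p.2
          else acc) acc) =
      (fun (acc : List (List (String × Int))) (i : Nat) =>
        List.foldl pvMergeStep acc
          (pvRow tl (ks.map (fun k => (PySem.Chars.lower k.toList, k.toList.length))) i)) := by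
    funext acc i
    rw [List.foldl_map]
    simp only [pvStep_if]
    rw [pvRow, List.filter_map, List.map_map, List.foldl_map, List.foldl_filter]
    rfl
  rw [hfun]

theorem pvMerge_ne_nil (l : List (List (String × Int))) (acc : List (List (String × Int)))
    (h : acc ≠ []) : l.foldl pvMergeStep acc ≠ [] := by
  induction l generalizing acc with
  | nil => exact h
  | cons x l ih =>
    rw [List.foldl_cons]
    apply ih
    rw [pvMergeStep]
    cases hl : acc.getLast? with
    | none => simp
    | some last =>
      dsimp only
      split_ifs <;> simp

theorem pvMerge_from_nil (l : List (List (String × Int))) :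
    l.foldl pvMergeStep [] = match l with | [] => [] | h :: t => t.foldl pvMergeStep [h] := by
  cases l with
  | nil => rfl
  | cons h t => rfl

-- ===== VERDICT (by name: the statement is the Claim_ definition above) =====
theorem calculate_highlights_py_spec : Claim_equal_calculate_highlights_py := by
  intro text keywords _
  unfold Spec_calculate_highlights_py
  cases keywords with
  | none => rfl
  | some ks =>
    by_cases hks : ks = []
    · simp [calculate_highlights_py, calculate_highlights_py_alt, hks]
    · rw [calculate_highlights_py, calculate_highlights_py_alt]
      simp only [hks, if_false]
      rw [pvMatchA_eq _ _ []]
      rw [List.nil_append]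
      rw [pvB_loop_eq]
      have hsort := pvSorted_matchA (PySem.Chars.lower text.toList) ks
      set MA := ks.flatMap (fun kw =>
        (pvOcc (PySem.Chars.lower text.toList) (PySem.Chars.lower kw.toList)).map
          (fun (i : Nat) => pvHL i kw.toList.length)) with hMA
      set MB := pvMatchB (PySem.Chars.lower text.toList)
        (ks.map (fun k => (PySem.Chars.lower k.toList, k.toList.length))) with hMB
      have hkey : (fun x => pvGetKey x "start") = pvKey := rfl
      rw [hkey]
      by_cases hA : MA = []
      · have hBnil : MB = [] := by
          rw [← hsort, hA]
          simp [PySem.List.sorted]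
        rw [hA, hBnil]
        simp
      · rw [if_neg hA]
        rw [hsort]
        cases hB : MB with
        | nil => exact absurd ((PySem.List.sorted_eq_nil_iff MA pvKey false).mp
            (by rw [hsort, hB])) hA
        | cons h0 rest =>
          rw [pvMerge_from_nil]
          simp only
          rw [if_neg (pvMerge_ne_nil rest [h0] (by simp))]
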